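-- pv_equiv track=rewrite | github.com/Vixiu/lolapi | Summoner.py | count_consecutive_elements
-- ===== SOURCE A (Python) =====
-- def count_consecutive_elements(lst):
--     if len(lst) < 2:
--         return ''
--     count_num = 1
--     first = lst[0]
--     if first == lst[1]:
--         for bl in lst[1:]:
--             if first == bl:
--                 count_num += 1
--             else:
--                 break
--         return f"{count_num}连{'胜' if first else '败'}中" if count_num > 1 else ''
--     else:
--         first = not first
--         count_num = 0
--         for bl in lst[1:]:
--             if first == bl:
--                 count_num += 1
--             else:
--                 break
--         return f"{count_num}连{'胜' if first else '败'}中断" if count_num > 2 else ''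
-- ===== SOURCE B (Python) =====
-- def count_consecutive_elements(lst):
--     # run-length encode the whole list once, then read the answer off the first two runs
--     if len(lst) < 2:
--         return ''
--     runs = []
--     for x in lst:
--         if runs and runs[-1][0] == x:
--             runs[-1][1] += 1
--         else:
--             runs.append([x, 1])
--     v0, n0 = runs[0]
--     if n0 >= 2:
--         return f"{n0}连{'胜' if v0 else '败'}中"
--     n1 = runs[1][1]
--     return f"{n1}连{'败' if v0 else '胜'}中断" if n1 > 2 else ''
-- ===== Notes on version B (the rewrite author's own statement) =====
-- stated objective: alternative
-- what changed: B run-length-encodes the list in one uniform pass and reads the streak/broken-streak answer off the first two runs, replacing A's two ad-hoc branch-specific counting loops.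
import Mathlib
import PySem

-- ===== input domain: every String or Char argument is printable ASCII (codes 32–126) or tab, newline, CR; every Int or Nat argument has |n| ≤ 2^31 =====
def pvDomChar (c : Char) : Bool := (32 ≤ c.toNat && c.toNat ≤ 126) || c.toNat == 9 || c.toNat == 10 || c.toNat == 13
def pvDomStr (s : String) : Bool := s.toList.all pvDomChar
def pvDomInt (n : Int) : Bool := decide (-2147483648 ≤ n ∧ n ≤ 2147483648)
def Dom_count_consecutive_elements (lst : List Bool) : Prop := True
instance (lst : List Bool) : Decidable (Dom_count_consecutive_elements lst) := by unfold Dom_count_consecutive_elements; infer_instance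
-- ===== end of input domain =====

-- B replaces A's two branch-specific counting loops by one run-length-encoding pass; same cost, plainer structure (return value only, no side effects).

-- ===== PORT A =====
-- A's for-loop over lst[1:] counting while equal to `first`, with break
def pvALoop (first : Bool) : List Bool → Int → Int
  | [], c => c
  | bl :: rest, c => if first == bl then pvALoop first rest (c + 1) else c

def count_consecutive_elements (lst : List Bool) : String :=
  match lst with
  | [] => ""
  | [_] => ""
  | a :: b :: rest =>
    if a == b then
      let c := pvALoop a (b :: rest) 1
      if c > 1 then PySem.Int.toStr c ++ "连" ++ (if a then "胜" else "败") ++ "中" else ""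
    else
      let f := !a
      let c := pvALoop f (b :: rest) 0
      if c > 2 then PySem.Int.toStr c ++ "连" ++ (if f then "胜" else "败") ++ "中断" else ""

-- ===== PORT B =====
-- Source B's loop body: merge x into the last run or append a fresh run
def pvPushRun (runs : List (Bool × Int)) (x : Bool) : List (Bool × Int) :=
  match runs.getLast? with
  | some (v, n) => if v == x then runs.dropLast ++ [(v, n + 1)] else runs ++ [(x, 1)]
  | none => [(x, 1)]

def count_consecutive_elements_alt (lst : List Bool) : String :=
  if lst.length < 2 then "" else
  match lst.foldl pvPushRun [] with
  | [] => ""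
  | (v0, n0) :: rest =>
    if n0 ≥ 2 then PySem.Int.toStr n0 ++ "连" ++ (if v0 then "胜" else "败") ++ "中"
    else
      match rest with
      | [] => ""
      | (_, n1) :: _ =>
        if n1 > 2 then PySem.Int.toStr n1 ++ "连" ++ (if v0 then "败" else "胜") ++ "中断" else ""

-- ===== PRECONDITION & SPEC =====
def Spec_count_consecutive_elements (lst : List Bool) (out : String) : Prop := out = count_consecutive_elements_alt lst
instance (lst : List Bool) (out : String) : Decidable (Spec_count_consecutive_elements lst out) := by unfold Spec_count_consecutive_elements; infer_instance

-- ===== CLAIM (what is proved, stated in full; the proofs are below) =====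
def Claim_equal_count_consecutive_elements : Prop := ∀ (lst : List Bool), Dom_count_consecutive_elements lst → Spec_count_consecutive_elements lst (count_consecutive_elements lst)

-- ===== LEMMAS AND PROOFS =====

-- A's loop adds the length of the leading run of `first` to the accumulator
theorem pvALoop_eq (first : Bool) (xs : List Bool) (c : Int) :
    pvALoop first xs c = c + (xs.takeWhile (· == first)).length := by
  induction xs generalizing c with
  | nil => simp [pvALoop]
  | cons x xs ih =>
    by_cases h : x = first
    · simp only [pvALoop, h, beq_self_eq_true, if_true, ih, List.takeWhile_cons,
        List.length_cons]
      push_cast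
      ring
    · have hx : (first == x) = false := by cases first <;> cases x <;> simp_all
      have hx' : (x == first) = false := by cases first <;> cases x <;> simp_all
      simp [pvALoop, hx, hx']

theorem pvPushRun_ne_nil (runs : List (Bool × Int)) (x : Bool) : pvPushRun runs x ≠ [] := by
  unfold pvPushRun
  cases h : runs.getLast? with
  | none => simp
  | some p => cases p with | mk v n => by_cases hv : v = x <;> simp [hv]

-- processing never touches a nonempty accumulator's prefix
theorem foldl_pvPushRun_append (xs : List Bool) (rs ys : List (Bool × Int)) (hys : ys ≠ []) :
    List.foldl pvPushRun (rs ++ ys) xs = rs ++ List.foldl pvPushRun ys xs := by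
  induction xs generalizing ys with
  | nil => simp
  | cons x xs ih =>
    have hpush : pvPushRun (rs ++ ys) x = rs ++ pvPushRun ys x := by
      unfold pvPushRun
      rw [List.getLast?_append_of_ne_nil rs hys]
      cases h : ys.getLast? with
      | none => exact absurd (List.getLast?_eq_none_iff.mp h) hys
      | some p =>
        cases p with | mk v n =>
        by_cases hv : v = x <;>
          simp [hv, List.dropLast_append_of_ne_nil hys, List.append_assoc]
    rw [List.foldl_cons, List.foldl_cons, hpush]
    exact ih _ (pvPushRun_ne_nil ys x)

-- starting from a single open run, the fold closes it at the first differing element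
theorem foldl_pvPushRun_single (xs : List Bool) (v : Bool) (n : Int) :
    List.foldl pvPushRun [(v, n)] xs =
      (v, n + (xs.takeWhile (· == v)).length) ::
        (match xs.dropWhile (· == v) with
         | [] => []
         | y :: ys => List.foldl pvPushRun [(y, 1)] ys) := by
  induction xs generalizing n with
  | nil => simp
  | cons x xs ih =>
    by_cases h : x = v
    · subst h
      rw [List.foldl_cons, show pvPushRun [(x, n)] x = [(x, n + 1)] by simp [pvPushRun], ih]
      simp
      omega
    · have hx : (x == v) = false := by cases v <;> cases x <;> simp_all
      have hvx : (v == x) = false := by cases v <;> cases x <;> simp_all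
      rw [List.foldl_cons, show pvPushRun [(v, n)] x = [(v, n), (x, 1)] by simp [pvPushRun, hvx],
        show ([(v, n), (x, 1)] : List (Bool × Int)) = [(v, n)] ++ [(x, 1)] by rfl,
        foldl_pvPushRun_append xs [(v, n)] [(x, 1)] (by simp)]
      simp [hx]

-- ===== VERDICT (by name: the statement is the Claim_ definition above) =====
theorem count_consecutive_elements_spec : Claim_equal_count_consecutive_elements := by
  intro lst _
  unfold Spec_count_consecutive_elements count_consecutive_elements count_consecutive_elements_alt
  cases lst with
  | nil => rfl
  | cons a t =>
  cases t with
  | nil => rfl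
  | cons b rest =>
    dsimp only
    rw [show List.foldl pvPushRun [] (a :: b :: rest) = List.foldl pvPushRun [(a, 1)] (b :: rest)
          from rfl,
      foldl_pvPushRun_single (b :: rest) a 1,
      if_neg (show ¬ ((a :: b :: rest).length < 2) by simp)]
    by_cases hab : a = b
    · subst hab
      rw [pvALoop_eq]
      have htw : (List.takeWhile (· == a) (a :: rest)) = a :: List.takeWhile (· == a) rest := by
        simp
      rw [htw]
      simp only [beq_self_eq_true, if_true, List.length_cons]
      push_cast
      have h1 : (0 : Int) ≤ ((rest.takeWhile (· == a)).length : Int) := Int.natCast_nonneg _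
      rw [if_pos (show (1 : Int) + (((rest.takeWhile (· == a)).length : Int) + 1) > 1 by omega),
        if_pos (show (1 : Int) + (((rest.takeWhile (· == a)).length : Int) + 1) ≥ 2 by omega)]
    · have hb : b = !a := by cases a <;> cases b <;> simp_all
      subst hb
      have hne : (a == !a) = false := by cases a <;> rfl
      have hne' : ((!a) == a) = false := by cases a <;> rfl
      have htw : (List.takeWhile (· == a) ((!a) :: rest)) = [] := by
        simp [hne']
      have hdw : (List.dropWhile (· == a) ((!a) :: rest)) = (!a) :: rest := by
        simp [hne']
      rw [htw, hdw]
      simp only [hne, Bool.false_eq_true, if_false, List.length_nil, Nat.cast_zero, add_zero]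
      rw [foldl_pvPushRun_single rest (!a) 1,
        if_neg (show ¬ ((1 : Int) ≥ 2) by omega)]
      have hval : pvALoop (!a) ((!a) :: rest) 0
          = 1 + ((rest.takeWhile (· == !a)).length : Int) := by
        rw [pvALoop_eq]
        have : (List.takeWhile (· == !a) ((!a) :: rest))
            = (!a) :: List.takeWhile (· == !a) rest := by
          simp
        rw [this, List.length_cons]
        push_cast
        ring
      rw [hval]
      cases a <;> dsimp only <;> rfl
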